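-- pv_equiv track=rewrite | github.com/slovjinika/dec2arm | dec2arm_demo.py | dec2arm
-- ===== SOURCE A (Python) =====
-- def dec2arm(input_number):
--     if not 1 <= input_number <= 29999:
--         raise ValueError("The number must be between 1 and 29999")
--
--     armenian_symbols = {
--         10000: "ՕՖ",
--         1000: "ՌՍՎՏՐՑՒՓՔ",
--         100: "ՃՄՅՆՇՈՉՊՋ",
--         10: "ԺԻԼԽԾԿՀՁՂ",
--         1: "ԱԲԳԴԵԶԷԸԹ"
--     }
--
--     result = ""
--     for divisor in [10000, 1000, 100, 10, 1]:
--         symbols = armenian_symbols[divisor]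
--         quotient, input_number = divmod(input_number, divisor)
--         if quotient > 0:
--             if divisor == 10000:
--                 result += symbols[quotient - 1] + "\u0305"  # Use overline for 10000 multiplier
--             else:
--                 result += symbols[quotient - 1]
--
--     if input_number > 0:
--         result += armenian_symbols[1][input_number - 1]
--
--     return result
-- ===== SOURCE B (Python) =====
-- # Greedy additive subtraction over one ordered value->symbol table (alternative decomposition).
-- _TABLE = [
--     (20000, "\u0556\u0305"), (10000, "\u0555\u0305"),
--     (9000, "Ք"), (8000, "Փ"), (7000, "Ւ"), (6000, "Ց"), (5000, "Ր"),
--     (4000, "Տ"), (3000, "Վ"), (2000, "Ս"), (1000, "Ռ"),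
--     (900, "Ջ"), (800, "Պ"), (700, "Չ"), (600, "Ո"), (500, "Շ"),
--     (400, "Ն"), (300, "Յ"), (200, "Մ"), (100, "Ճ"),
--     (90, "Ղ"), (80, "Ձ"), (70, "Հ"), (60, "Կ"), (50, "Ծ"),
--     (40, "Խ"), (30, "Լ"), (20, "Ի"), (10, "Ժ"),
--     (9, "Թ"), (8, "Ը"), (7, "Է"), (6, "Զ"), (5, "Ե"),
--     (4, "Դ"), (3, "Գ"), (2, "Բ"), (1, "Ա"),
-- ]
--
-- def dec2arm(input_number):
--     if not 1 <= input_number <= 29999: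
--         raise ValueError("The number must be between 1 and 29999")
--     parts = []
--     remaining = input_number
--     for value, symbol in _TABLE:
--         if remaining >= value:
--             parts.append(symbol)
--             remaining -= value
--     return "".join(parts)
-- ===== Notes on version B (the rewrite author's own statement) =====
-- stated objective: alternative
-- what changed: Replaces the divmod-per-power-of-ten loop with dictionary lookups and per-decade indexing by a single greedy subtraction pass over one ordered value-to-symbol table.
import Mathlib
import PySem

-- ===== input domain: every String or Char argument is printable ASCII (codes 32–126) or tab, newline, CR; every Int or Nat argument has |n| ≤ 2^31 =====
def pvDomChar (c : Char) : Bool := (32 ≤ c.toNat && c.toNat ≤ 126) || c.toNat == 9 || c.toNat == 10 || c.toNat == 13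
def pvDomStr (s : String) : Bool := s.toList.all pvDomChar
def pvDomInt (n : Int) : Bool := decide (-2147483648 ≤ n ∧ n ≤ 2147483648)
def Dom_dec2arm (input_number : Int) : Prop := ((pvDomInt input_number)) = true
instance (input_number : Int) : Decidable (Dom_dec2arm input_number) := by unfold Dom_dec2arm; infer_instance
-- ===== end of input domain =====

-- B replaces A's divmod-per-power-of-ten loop over a digit-symbol dict by a single greedy
-- subtraction pass over one ordered value→symbol table (alternative decomposition).

-- ===== PORT A =====
def dec2armSymbols : PySem.Dict Int String := PySem.Dict.ofList
  [(10000, "ՕՖ"), (1000, "ՌՍՎՏՐՑՒՓՔ"), (100, "ՃՄՅՆՇՈՉՊՋ"),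
   (10, "ԺԻԼԽԾԿՀՁՂ"), (1, "ԱԲԳԴԵԶԷԸԹ")]

-- loop body of A, named for the port
def dec2armLoop (armenian_symbols : PySem.Dict Int String) (st : String × Int) (divisor : Int) :
    String × Int :=
  let symbols := armenian_symbols.getD divisor ""
  let quotient := PySem.Int.floordiv st.2 divisor
  let remainder := PySem.Int.mod st.2 divisor
  let result :=
    if quotient > 0 then
      match PySem.Str.pyGet? symbols (quotient - 1) with
      | some c =>
          if divisor == 10000 then st.1 ++ String.ofList [c] ++ "\u0305"
          else st.1 ++ String.ofList [c]
      | none => st.1   -- IndexError; unreachable inside Pre_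
    else st.1
  (result, remainder)

def dec2arm (input_number : Int) : String :=
  if ¬ (1 ≤ input_number ∧ input_number ≤ 29999) then ""   -- ValueError; excluded by Pre_
  else
    let st := [(10000 : Int), 1000, 100, 10, 1].foldl (dec2armLoop dec2armSymbols) ("", input_number)
    if st.2 > 0 then
      match PySem.Str.pyGet? (dec2armSymbols.getD 1 "") (st.2 - 1) with
      | some c => st.1 ++ String.ofList [c]
      | none => st.1
    else st.1

-- ===== PORT B =====
def dec2armTable : List (Int × String) :=
  [(20000, "\u0556\u0305"), (10000, "\u0555\u0305"),
   (9000, "Ք"), (8000, "Փ"), (7000, "Ւ"), (6000, "Ց"), (5000, "Ր"),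
   (4000, "Տ"), (3000, "Վ"), (2000, "Ս"), (1000, "Ռ"),
   (900, "Ջ"), (800, "Պ"), (700, "Չ"), (600, "Ո"), (500, "Շ"),
   (400, "Ն"), (300, "Յ"), (200, "Մ"), (100, "Ճ"),
   (90, "Ղ"), (80, "Ձ"), (70, "Հ"), (60, "Կ"), (50, "Ծ"),
   (40, "Խ"), (30, "Լ"), (20, "Ի"), (10, "Ժ"),
   (9, "Թ"), (8, "Ը"), (7, "Է"), (6, "Զ"), (5, "Ե"),
   (4, "Դ"), (3, "Գ"), (2, "Բ"), (1, "Ա")]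

-- loop body of B, named for the port
def dec2armStep (st : List String × Int) (entry : Int × String) : List String × Int :=
  if st.2 ≥ entry.1 then (st.1 ++ [entry.2], st.2 - entry.1) else st

def dec2arm_alt (input_number : Int) : String :=
  if ¬ (1 ≤ input_number ∧ input_number ≤ 29999) then ""   -- ValueError; excluded by Pre_
  else
    let st := dec2armTable.foldl dec2armStep ([], input_number)
    PySem.Str.join "" st.1

-- ===== PRECONDITION & SPEC =====
-- A raises ValueError exactly outside 1..29999; Pre_ admits every input on which A returns.
def Pre_dec2arm (input_number : Int) : Prop := 1 ≤ input_number ∧ input_number ≤ 29999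
instance (input_number : Int) : Decidable (Pre_dec2arm input_number) := by unfold Pre_dec2arm; infer_instance
def pvWitness_dec2arm : Int := (12345)

def Spec_dec2arm (input_number : Int) (out : String) : Prop := out = dec2arm_alt input_number
instance (input_number : Int) (out : String) : Decidable (Spec_dec2arm input_number out) := by unfold Spec_dec2arm; infer_instance

-- ===== CLAIM (what is proved, stated in full; the proofs are below) =====
def Claim_equal_dec2arm : Prop := ∀ (input_number : Int), Dom_dec2arm input_number → Pre_dec2arm input_number → Spec_dec2arm input_number (dec2arm input_number)

-- ===== LEMMAS AND PROOFS =====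

-- per-digit symbol lists of B's greedy pass
def symsMy : Int → List String := fun q =>
  if q = 2 then ["\u0556\u0305"] else if q = 1 then ["\u0555\u0305"] else []
def symsTh : Int → List String := fun q =>
  if q = 9 then ["Ք"] else if q = 8 then ["Փ"] else if q = 7 then ["Ւ"] else
  if q = 6 then ["Ց"] else if q = 5 then ["Ր"] else if q = 4 then ["Տ"] else
  if q = 3 then ["Վ"] else if q = 2 then ["Ս"] else if q = 1 then ["Ռ"] else []
def symsHu : Int → List String := fun q =>
  if q = 9 then ["Ջ"] else if q = 8 then ["Պ"] else if q = 7 then ["Չ"] else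
  if q = 6 then ["Ո"] else if q = 5 then ["Շ"] else if q = 4 then ["Ն"] else
  if q = 3 then ["Յ"] else if q = 2 then ["Մ"] else if q = 1 then ["Ճ"] else []
def symsTe : Int → List String := fun q =>
  if q = 9 then ["Ղ"] else if q = 8 then ["Ձ"] else if q = 7 then ["Հ"] else
  if q = 6 then ["Կ"] else if q = 5 then ["Ծ"] else if q = 4 then ["Խ"] else
  if q = 3 then ["Լ"] else if q = 2 then ["Ի"] else if q = 1 then ["Ժ"] else []
def symsOn : Int → List String := fun q =>
  if q = 9 then ["Թ"] else if q = 8 then ["Ը"] else if q = 7 then ["Է"] else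
  if q = 6 then ["Զ"] else if q = 5 then ["Ե"] else if q = 4 then ["Դ"] else
  if q = 3 then ["Գ"] else if q = 2 then ["Բ"] else if q = 1 then ["Ա"] else []

-- joined (string) versions, the common right-hand shape of both ports
def JMy (q : Int) : String := PySem.Str.join "" (symsMy q)
def JTh (q : Int) : String := PySem.Str.join "" (symsTh q)
def JHu (q : Int) : String := PySem.Str.join "" (symsHu q)
def JTe (q : Int) : String := PySem.Str.join "" (symsTe q)
def JOn (q : Int) : String := PySem.Str.join "" (symsOn q)

theorem step_ge (acc : List String) (r v : Int) (sym : String) (h : r ≥ v) :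
    dec2armStep (acc, r) (v, sym) = (acc ++ [sym], r - v) := by
  simp [dec2armStep, h]

theorem step_lt (acc : List String) (r v : Int) (sym : String) (h : ¬ r ≥ v) :
    dec2armStep (acc, r) (v, sym) = (acc, r) := by
  simp [dec2armStep]; omega

-- B's greedy pass over one decade of the table consumes exactly that digit
theorem fold_my (acc : List String) (q s : Int) (hq0 : 0 ≤ q) (hq : q ≤ 2)
    (hs0 : 0 ≤ s) (hs : s < 10000) :
    List.foldl dec2armStep (acc, q*10000+s)
      [(20000, "\u0556\u0305"), (10000, "\u0555\u0305")] = (acc ++ symsMy q, s) := by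
  interval_cases q <;>
    (repeat first
      | rw [List.foldl_cons, step_ge _ _ _ _ (by omega)]
      | rw [List.foldl_cons, step_lt _ _ _ _ (by omega)]) <;>
    rw [List.foldl_nil, Prod.mk.injEq] <;>
    exact ⟨by norm_num [symsMy], by omega⟩

theorem fold_th (acc : List String) (q s : Int) (hq0 : 0 ≤ q) (hq : q ≤ 9)
    (hs0 : 0 ≤ s) (hs : s < 1000) :
    List.foldl dec2armStep (acc, q*1000+s)
      [(9000, "Ք"), (8000, "Փ"), (7000, "Ւ"), (6000, "Ց"), (5000, "Ր"),
       (4000, "Տ"), (3000, "Վ"), (2000, "Ս"), (1000, "Ռ")] = (acc ++ symsTh q, s) := by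
  interval_cases q <;>
    (repeat first
      | rw [List.foldl_cons, step_ge _ _ _ _ (by omega)]
      | rw [List.foldl_cons, step_lt _ _ _ _ (by omega)]) <;>
    rw [List.foldl_nil, Prod.mk.injEq] <;>
    exact ⟨by norm_num [symsTh], by omega⟩

theorem fold_hu (acc : List String) (q s : Int) (hq0 : 0 ≤ q) (hq : q ≤ 9)
    (hs0 : 0 ≤ s) (hs : s < 100) :
    List.foldl dec2armStep (acc, q*100+s)
      [(900, "Ջ"), (800, "Պ"), (700, "Չ"), (600, "Ո"), (500, "Շ"),
       (400, "Ն"), (300, "Յ"), (200, "Մ"), (100, "Ճ")] = (acc ++ symsHu q, s) := by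
  interval_cases q <;>
    (repeat first
      | rw [List.foldl_cons, step_ge _ _ _ _ (by omega)]
      | rw [List.foldl_cons, step_lt _ _ _ _ (by omega)]) <;>
    rw [List.foldl_nil, Prod.mk.injEq] <;>
    exact ⟨by norm_num [symsHu], by omega⟩

theorem fold_te (acc : List String) (q s : Int) (hq0 : 0 ≤ q) (hq : q ≤ 9)
    (hs0 : 0 ≤ s) (hs : s < 10) :
    List.foldl dec2armStep (acc, q*10+s)
      [(90, "Ղ"), (80, "Ձ"), (70, "Հ"), (60, "Կ"), (50, "Ծ"),
       (40, "Խ"), (30, "Լ"), (20, "Ի"), (10, "Ժ")] = (acc ++ symsTe q, s) := by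
  interval_cases q <;>
    (repeat first
      | rw [List.foldl_cons, step_ge _ _ _ _ (by omega)]
      | rw [List.foldl_cons, step_lt _ _ _ _ (by omega)]) <;>
    rw [List.foldl_nil, Prod.mk.injEq] <;>
    exact ⟨by norm_num [symsTe], by omega⟩

theorem fold_on (acc : List String) (q s : Int) (hq0 : 0 ≤ q) (hq : q ≤ 9)
    (hs0 : 0 ≤ s) (hs : s < 1) :
    List.foldl dec2armStep (acc, q*1+s)
      [(9, "Թ"), (8, "Ը"), (7, "Է"), (6, "Զ"), (5, "Ե"),
       (4, "Դ"), (3, "Գ"), (2, "Բ"), (1, "Ա")] = (acc ++ symsOn q, s) := by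
  interval_cases q <;>
    (repeat first
      | rw [List.foldl_cons, step_ge _ _ _ _ (by omega)]
      | rw [List.foldl_cons, step_lt _ _ _ _ (by omega)]) <;>
    rw [List.foldl_nil, Prod.mk.injEq] <;>
    exact ⟨by norm_num [symsOn], by omega⟩

-- A's loop body at each concrete divisor emits the same digit symbol
theorem aloop_my (acc : String) (q s : Int) (hq0 : 0 ≤ q) (hq : q ≤ 2)
    (hs0 : 0 ≤ s) (hs : s < 10000) :
    dec2armLoop dec2armSymbols (acc, q*10000+s) 10000 = (acc ++ JMy q, s) := by
  have h1 : PySem.Int.floordiv (q*10000+s) 10000 = q :=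
    (PySem.Int.floordiv_eq_iff_of_pos (by norm_num)).mpr ⟨by omega, by omega⟩
  have h2 : PySem.Int.mod (q*10000+s) 10000 = s := by
    have h3 := PySem.Int.floordiv_mul_add_mod (q*10000+s) 10000
    rw [h1] at h3; omega
  simp only [dec2armLoop]
  rw [h1, h2, show dec2armSymbols.getD 10000 "" = "ՕՖ" from by decide]
  interval_cases q <;>
    (rw [Prod.mk.injEq]
     refine ⟨?_, rfl⟩
     rw [← String.toList_inj]
     norm_num [JMy, symsMy, PySem.Str.toList_join, PySem.Chars.join,
       String.toList_append, List.intercalate,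
       show PySem.List.pyGet? "ՕՖ".toList 0 = some 'Օ' from by decide,
       show PySem.List.pyGet? "ՕՖ".toList 1 = some 'Ֆ' from by decide]
     <;> try decide)

theorem aloop_th (acc : String) (q s : Int) (hq0 : 0 ≤ q) (hq : q ≤ 9)
    (hs0 : 0 ≤ s) (hs : s < 1000) :
    dec2armLoop dec2armSymbols (acc, q*1000+s) 1000 = (acc ++ JTh q, s) := by
  have h1 : PySem.Int.floordiv (q*1000+s) 1000 = q :=
    (PySem.Int.floordiv_eq_iff_of_pos (by norm_num)).mpr ⟨by omega, by omega⟩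
  have h2 : PySem.Int.mod (q*1000+s) 1000 = s := by
    have h3 := PySem.Int.floordiv_mul_add_mod (q*1000+s) 1000
    rw [h1] at h3; omega
  simp only [dec2armLoop]
  rw [h1, h2, show dec2armSymbols.getD 1000 "" = "ՌՍՎՏՐՑՒՓՔ" from by decide]
  interval_cases q <;>
    (rw [Prod.mk.injEq]
     refine ⟨?_, rfl⟩
     rw [← String.toList_inj]
     norm_num [JTh, symsTh, PySem.Str.toList_join, PySem.Chars.join,
       String.toList_append, List.intercalate,
       show PySem.List.pyGet? "ՌՍՎՏՐՑՒՓՔ".toList 0 = some 'Ռ' from by decide,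
       show PySem.List.pyGet? "ՌՍՎՏՐՑՒՓՔ".toList 1 = some 'Ս' from by decide,
       show PySem.List.pyGet? "ՌՍՎՏՐՑՒՓՔ".toList 2 = some 'Վ' from by decide,
       show PySem.List.pyGet? "ՌՍՎՏՐՑՒՓՔ".toList 3 = some 'Տ' from by decide,
       show PySem.List.pyGet? "ՌՍՎՏՐՑՒՓՔ".toList 4 = some 'Ր' from by decide,
       show PySem.List.pyGet? "ՌՍՎՏՐՑՒՓՔ".toList 5 = some 'Ց' from by decide,
       show PySem.List.pyGet? "ՌՍՎՏՐՑՒՓՔ".toList 6 = some 'Ւ' from by decide,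
       show PySem.List.pyGet? "ՌՍՎՏՐՑՒՓՔ".toList 7 = some 'Փ' from by decide,
       show PySem.List.pyGet? "ՌՍՎՏՐՑՒՓՔ".toList 8 = some 'Ք' from by decide]
     <;> try decide)

theorem aloop_hu (acc : String) (q s : Int) (hq0 : 0 ≤ q) (hq : q ≤ 9)
    (hs0 : 0 ≤ s) (hs : s < 100) :
    dec2armLoop dec2armSymbols (acc, q*100+s) 100 = (acc ++ JHu q, s) := by
  have h1 : PySem.Int.floordiv (q*100+s) 100 = q :=
    (PySem.Int.floordiv_eq_iff_of_pos (by norm_num)).mpr ⟨by omega, by omega⟩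
  have h2 : PySem.Int.mod (q*100+s) 100 = s := by
    have h3 := PySem.Int.floordiv_mul_add_mod (q*100+s) 100
    rw [h1] at h3; omega
  simp only [dec2armLoop]
  rw [h1, h2, show dec2armSymbols.getD 100 "" = "ՃՄՅՆՇՈՉՊՋ" from by decide]
  interval_cases q <;>
    (rw [Prod.mk.injEq]
     refine ⟨?_, rfl⟩
     rw [← String.toList_inj]
     norm_num [JHu, symsHu, PySem.Str.toList_join, PySem.Chars.join,
       String.toList_append, List.intercalate,
       show PySem.List.pyGet? "ՃՄՅՆՇՈՉՊՋ".toList 0 = some 'Ճ' from by decide,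
       show PySem.List.pyGet? "ՃՄՅՆՇՈՉՊՋ".toList 1 = some 'Մ' from by decide,
       show PySem.List.pyGet? "ՃՄՅՆՇՈՉՊՋ".toList 2 = some 'Յ' from by decide,
       show PySem.List.pyGet? "ՃՄՅՆՇՈՉՊՋ".toList 3 = some 'Ն' from by decide,
       show PySem.List.pyGet? "ՃՄՅՆՇՈՉՊՋ".toList 4 = some 'Շ' from by decide,
       show PySem.List.pyGet? "ՃՄՅՆՇՈՉՊՋ".toList 5 = some 'Ո' from by decide,
       show PySem.List.pyGet? "ՃՄՅՆՇՈՉՊՋ".toList 6 = some 'Չ' from by decide,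
       show PySem.List.pyGet? "ՃՄՅՆՇՈՉՊՋ".toList 7 = some 'Պ' from by decide,
       show PySem.List.pyGet? "ՃՄՅՆՇՈՉՊՋ".toList 8 = some 'Ջ' from by decide]
     <;> try decide)

theorem aloop_te (acc : String) (q s : Int) (hq0 : 0 ≤ q) (hq : q ≤ 9)
    (hs0 : 0 ≤ s) (hs : s < 10) :
    dec2armLoop dec2armSymbols (acc, q*10+s) 10 = (acc ++ JTe q, s) := by
  have h1 : PySem.Int.floordiv (q*10+s) 10 = q :=
    (PySem.Int.floordiv_eq_iff_of_pos (by norm_num)).mpr ⟨by omega, by omega⟩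
  have h2 : PySem.Int.mod (q*10+s) 10 = s := by
    have h3 := PySem.Int.floordiv_mul_add_mod (q*10+s) 10
    rw [h1] at h3; omega
  simp only [dec2armLoop]
  rw [h1, h2, show dec2armSymbols.getD 10 "" = "ԺԻԼԽԾԿՀՁՂ" from by decide]
  interval_cases q <;>
    (rw [Prod.mk.injEq]
     refine ⟨?_, rfl⟩
     rw [← String.toList_inj]
     norm_num [JTe, symsTe, PySem.Str.toList_join, PySem.Chars.join,
       String.toList_append, List.intercalate,
       show PySem.List.pyGet? "ԺԻԼԽԾԿՀՁՂ".toList 0 = some 'Ժ' from by decide,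
       show PySem.List.pyGet? "ԺԻԼԽԾԿՀՁՂ".toList 1 = some 'Ի' from by decide,
       show PySem.List.pyGet? "ԺԻԼԽԾԿՀՁՂ".toList 2 = some 'Լ' from by decide,
       show PySem.List.pyGet? "ԺԻԼԽԾԿՀՁՂ".toList 3 = some 'Խ' from by decide,
       show PySem.List.pyGet? "ԺԻԼԽԾԿՀՁՂ".toList 4 = some 'Ծ' from by decide,
       show PySem.List.pyGet? "ԺԻԼԽԾԿՀՁՂ".toList 5 = some 'Կ' from by decide,
       show PySem.List.pyGet? "ԺԻԼԽԾԿՀՁՂ".toList 6 = some 'Հ' from by decide,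
       show PySem.List.pyGet? "ԺԻԼԽԾԿՀՁՂ".toList 7 = some 'Ձ' from by decide,
       show PySem.List.pyGet? "ԺԻԼԽԾԿՀՁՂ".toList 8 = some 'Ղ' from by decide]
     <;> try decide)

theorem aloop_on (acc : String) (q s : Int) (hq0 : 0 ≤ q) (hq : q ≤ 9)
    (hs0 : 0 ≤ s) (hs : s < 1) :
    dec2armLoop dec2armSymbols (acc, q*1+s) 1 = (acc ++ JOn q, s) := by
  have h1 : PySem.Int.floordiv (q*1+s) 1 = q :=
    (PySem.Int.floordiv_eq_iff_of_pos (by norm_num)).mpr ⟨by omega, by omega⟩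
  have h2 : PySem.Int.mod (q*1+s) 1 = s := by
    have h3 := PySem.Int.floordiv_mul_add_mod (q*1+s) 1
    rw [h1] at h3; omega
  simp only [dec2armLoop]
  rw [h1, h2, show dec2armSymbols.getD 1 "" = "ԱԲԳԴԵԶԷԸԹ" from by decide]
  interval_cases q <;>
    (rw [Prod.mk.injEq]
     refine ⟨?_, rfl⟩
     rw [← String.toList_inj]
     norm_num [JOn, symsOn, PySem.Str.toList_join, PySem.Chars.join,
       String.toList_append, List.intercalate,
       show PySem.List.pyGet? "ԱԲԳԴԵԶԷԸԹ".toList 0 = some 'Ա' from by decide,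
       show PySem.List.pyGet? "ԱԲԳԴԵԶԷԸԹ".toList 1 = some 'Բ' from by decide,
       show PySem.List.pyGet? "ԱԲԳԴԵԶԷԸԹ".toList 2 = some 'Գ' from by decide,
       show PySem.List.pyGet? "ԱԲԳԴԵԶԷԸԹ".toList 3 = some 'Դ' from by decide,
       show PySem.List.pyGet? "ԱԲԳԴԵԶԷԸԹ".toList 4 = some 'Ե' from by decide,
       show PySem.List.pyGet? "ԱԲԳԴԵԶԷԸԹ".toList 5 = some 'Զ' from by decide,
       show PySem.List.pyGet? "ԱԲԳԴԵԶԷԸԹ".toList 6 = some 'Է' from by decide,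
       show PySem.List.pyGet? "ԱԲԳԴԵԶԷԸԹ".toList 7 = some 'Ը' from by decide,
       show PySem.List.pyGet? "ԱԲԳԴԵԶԷԸԹ".toList 8 = some 'Թ' from by decide]
     <;> try decide)

theorem A_eq (a b c d e : Int) (ha0 : 0 ≤ a) (ha : a ≤ 2) (hb0 : 0 ≤ b) (hb : b ≤ 9)
    (hc0 : 0 ≤ c) (hc : c ≤ 9) (hd0 : 0 ≤ d) (hd : d ≤ 9) (he0 : 0 ≤ e) (he : e ≤ 9)
    (hpos : 1 ≤ a*10000+b*1000+c*100+d*10+e) :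
    dec2arm (a*10000+b*1000+c*100+d*10+e) =
      (((("" ++ JMy a) ++ JTh b) ++ JHu c) ++ JTe d) ++ JOn e := by
  unfold dec2arm
  rw [if_neg (by omega)]
  simp only [List.foldl_cons, List.foldl_nil]
  rw [show a*10000+b*1000+c*100+d*10+e = a*10000+(b*1000+(c*100+(d*10+(e*1+0)))) from by ring]
  rw [aloop_my "" a _ ha0 ha (by omega) (by omega)]
  rw [aloop_th _ b _ hb0 hb (by omega) (by omega)]
  rw [aloop_hu _ c _ hc0 hc (by omega) (by omega)]
  rw [aloop_te _ d _ hd0 hd (by omega) (by omega)]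
  rw [aloop_on _ e 0 he0 he (by omega) (by omega)]
  norm_num

theorem intercalate_nil_eq_flatten {α : Type} (xs : List (List α)) :
    ([] : List α).intercalate xs = xs.flatten := by
  simp only [List.intercalate]
  induction xs with
  | nil => rfl
  | cons x t ih =>
    cases t with
    | nil => rfl
    | cons y t' => simpa [List.intersperse] using ih

theorem join_empty_append (xs ys : List String) :
    PySem.Str.join "" (xs ++ ys) = PySem.Str.join "" xs ++ PySem.Str.join "" ys := by
  rw [← String.toList_inj]
  simp [PySem.Str.toList_join, PySem.Chars.join, intercalate_nil_eq_flatten]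

theorem B_eq (a b c d e : Int) (ha0 : 0 ≤ a) (ha : a ≤ 2) (hb0 : 0 ≤ b) (hb : b ≤ 9)
    (hc0 : 0 ≤ c) (hc : c ≤ 9) (hd0 : 0 ≤ d) (hd : d ≤ 9) (he0 : 0 ≤ e) (he : e ≤ 9)
    (hpos : 1 ≤ a*10000+b*1000+c*100+d*10+e) :
    dec2arm_alt (a*10000+b*1000+c*100+d*10+e) =
      (((("" ++ JMy a) ++ JTh b) ++ JHu c) ++ JTe d) ++ JOn e := by
  unfold dec2arm_alt
  rw [if_neg (by omega)]
  rw [show dec2armTable =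
      [(20000, "\u0556\u0305"), (10000, "\u0555\u0305")] ++
      ([(9000, "Ք"), (8000, "Փ"), (7000, "Ւ"), (6000, "Ց"), (5000, "Ր"),
        (4000, "Տ"), (3000, "Վ"), (2000, "Ս"), (1000, "Ռ")] ++
       ([(900, "Ջ"), (800, "Պ"), (700, "Չ"), (600, "Ո"), (500, "Շ"),
         (400, "Ն"), (300, "Յ"), (200, "Մ"), (100, "Ճ")] ++
        ([(90, "Ղ"), (80, "Ձ"), (70, "Հ"), (60, "Կ"), (50, "Ծ"),
          (40, "Խ"), (30, "Լ"), (20, "Ի"), (10, "Ժ")] ++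
         [(9, "Թ"), (8, "Ը"), (7, "Է"), (6, "Զ"), (5, "Ե"),
          (4, "Դ"), (3, "Գ"), (2, "Բ"), (1, "Ա")]))) from rfl]
  rw [List.foldl_append, List.foldl_append, List.foldl_append, List.foldl_append]
  rw [show a*10000+b*1000+c*100+d*10+e = a*10000+(b*1000+(c*100+(d*10+(e*1+0)))) from by ring]
  rw [fold_my [] a _ ha0 ha (by omega) (by omega)]
  rw [fold_th _ b _ hb0 hb (by omega) (by omega)]
  rw [fold_hu _ c _ hc0 hc (by omega) (by omega)]
  rw [fold_te _ d _ hd0 hd (by omega) (by omega)]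
  rw [fold_on _ e 0 he0 he (by omega) (by omega)]
  simp only [List.nil_append, join_empty_append]
  rw [JMy, JTh, JHu, JTe, JOn]
  rw [← String.toList_inj]
  simp [String.toList_append]

-- ===== VERDICT (by name: the statement is the Claim_ definition above) =====
theorem dec2arm_spec : Claim_equal_dec2arm := by
  intro n _ hpre
  unfold Spec_dec2arm
  obtain ⟨h1, h2⟩ := hpre
  obtain ⟨a, b, c, d, e, ha0, ha, hb0, hb, hc0, hc, hd0, hd, he0, he, hn⟩ :
      ∃ a b c d e : Int, 0 ≤ a ∧ a ≤ 2 ∧ 0 ≤ b ∧ b ≤ 9 ∧ 0 ≤ c ∧ c ≤ 9 ∧ 0 ≤ d ∧ d ≤ 9 ∧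
        0 ≤ e ∧ e ≤ 9 ∧ n = a*10000+b*1000+c*100+d*10+e :=
    ⟨n / 10000, n % 10000 / 1000, n % 1000 / 100, n % 100 / 10, n % 10,
     by omega, by omega, by omega, by omega, by omega, by omega, by omega, by omega,
     by omega, by omega, by omega⟩
  subst hn
  rw [A_eq a b c d e ha0 ha hb0 hb hc0 hc hd0 hd he0 he (by omega),
      B_eq a b c d e ha0 ha hb0 hb hc0 hc hd0 hd he0 he (by omega)]
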